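-- pv_equiv track=rewrite | github.com/Millyaa-11/PCA | Lab4/ex1_graph_bigo/algorithm1to12.py | m06
-- ===== SOURCE A (Python) =====
-- def m06(n):
--     rounds = 0
--     sumit = 0
--
--     while rounds < n:
--         rounds2 = 0
--         while rounds2 < n * n:
--             sumit += 1
--             rounds2 += 1
--         rounds += 1
--     return sumit
-- ===== SOURCE B (Python) =====
-- def m06(n):
--     # closed form: the nested loops add 1 exactly n * n*n times when n > 0
--     return n * n * n if n > 0 else 0
-- ===== Notes on version B (the rewrite author's own statement) =====
-- stated objective: faster
-- what changed: Replaced the two nested counting loops with the closed form n*n*n (0 for n <= 0).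
import Mathlib
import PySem

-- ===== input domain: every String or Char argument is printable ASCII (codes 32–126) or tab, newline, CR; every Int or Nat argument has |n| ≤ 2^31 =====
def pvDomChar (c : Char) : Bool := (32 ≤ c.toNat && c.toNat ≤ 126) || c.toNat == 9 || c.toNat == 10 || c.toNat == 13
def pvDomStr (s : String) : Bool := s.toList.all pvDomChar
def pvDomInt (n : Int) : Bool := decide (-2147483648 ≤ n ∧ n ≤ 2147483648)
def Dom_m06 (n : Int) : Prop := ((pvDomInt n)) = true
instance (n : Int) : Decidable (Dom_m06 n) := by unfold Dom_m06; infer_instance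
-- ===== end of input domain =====

-- B replaces A's nested counting loops by the closed form n*n*n (0 for n ≤ 0): asymptotically faster.

-- ===== PORT A =====
-- inner 'while rounds2 < n*n: sumit += 1; rounds2 += 1'
def m06Inner (m : Int) (rounds2 : Int) (sumit : Int) : Int :=
  if _h : rounds2 < m then m06Inner m (rounds2 + 1) (sumit + 1) else sumit
termination_by (m - rounds2).toNat
decreasing_by omega

-- outer 'while rounds < n: <inner loop>; rounds += 1'
def m06Outer (n : Int) (rounds : Int) (sumit : Int) : Int :=
  if _h : rounds < n then m06Outer n (rounds + 1) (m06Inner (n * n) 0 sumit) else sumit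
termination_by (n - rounds).toNat
decreasing_by omega

def m06 (n : Int) : Int := m06Outer n 0 0

-- ===== PORT B =====
def m06_alt (n : Int) : Int := if n > 0 then n * n * n else 0

-- ===== PRECONDITION & SPEC =====
def Spec_m06 (n : Int) (out : Int) : Prop := out = m06_alt n
instance (n : Int) (out : Int) : Decidable (Spec_m06 n out) := by unfold Spec_m06; infer_instance

-- ===== CLAIM (what is proved, stated in full; the proofs are below) =====
def Claim_equal_m06 : Prop := ∀ (n : Int), Dom_m06 n → Spec_m06 n (m06 n)

-- ===== LEMMAS AND PROOFS =====

theorem m06Inner_eq (m rounds2 sumit : Int) :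
    m06Inner m rounds2 sumit = sumit + max (m - rounds2) 0 := by
  induction rounds2, sumit using m06Inner.induct m with
  | case1 r s h ih =>
      rw [m06Inner, dif_pos h, ih]; omega
  | case2 r s h =>
      rw [m06Inner, dif_neg h]; omega

theorem m06Outer_eq (n rounds sumit : Int) :
    m06Outer n rounds sumit = sumit + max (n - rounds) 0 * max (n * n) 0 := by
  induction rounds, sumit using m06Outer.induct n with
  | case1 r s h ih =>
      rw [m06Outer, dif_pos h, ih, m06Inner_eq]
      have h1 : max (n - r) 0 = max (n - (r + 1)) 0 + 1 := by omega
      have h2 : max (n * n - 0) 0 = max (n * n) 0 := by omega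
      rw [h1, h2]; ring
  | case2 r s h =>
      rw [m06Outer, dif_neg h]
      have : max (n - r) 0 = 0 := by omega
      rw [this]; ring

-- ===== VERDICT (by name: the statement is the Claim_ definition above) =====
theorem m06_spec : Claim_equal_m06 := by
  intro n _
  unfold Spec_m06 m06 m06_alt
  rw [m06Outer_eq]
  by_cases hn : n > 0
  · have hnn : 0 ≤ n * n := mul_self_nonneg n
    rw [if_pos hn]
    have h1 : max (n - 0) 0 = n := by omega
    have h2 : max (n * n) 0 = n * n := by omega
    rw [h1, h2]; ring
  · rw [if_neg hn]
    have : max (n - 0) 0 = 0 := by omega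
    rw [this]; ring
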